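-- pv_equiv track=rewrite | github.com/zifox666/xiaobawang | xiaobawang/plugins/core/utils/common/__init__.py | type_word
-- ===== SOURCE A (Python) =====
-- def type_word(args: str) -> str:
--     """
--     整理合同内容
--     :param args: 合同内容
--     :return: 整理后的合同内容
--     """
--     args = args.replace('\r', '\n')
--     lines = args.split('\n')
--     converted_text = ''
--     for line in lines:
--         fields = line.split('\t')
--         converted_text += '\t'.join(fields) + '\n'
--     return converted_text
-- ===== SOURCE B (Python) =====
-- def type_word(args: str) -> str:
--     """
--     整理合同内容
--     :param args: 合同内容
--     :return: 整理后的合同内容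
--     """
--     return args.replace('\r', '\n') + '\n'
-- ===== Notes on version B (the rewrite author's own statement) =====
-- stated objective: simpler
-- what changed: A's tab split/rejoin is a no-op and rejoining the split lines with one newline per line reconstructs the CR-normalized string plus a final newline, so B replaces the whole loop with a single closed-form expression: the replace call plus one appended newline character.
import Mathlib
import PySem

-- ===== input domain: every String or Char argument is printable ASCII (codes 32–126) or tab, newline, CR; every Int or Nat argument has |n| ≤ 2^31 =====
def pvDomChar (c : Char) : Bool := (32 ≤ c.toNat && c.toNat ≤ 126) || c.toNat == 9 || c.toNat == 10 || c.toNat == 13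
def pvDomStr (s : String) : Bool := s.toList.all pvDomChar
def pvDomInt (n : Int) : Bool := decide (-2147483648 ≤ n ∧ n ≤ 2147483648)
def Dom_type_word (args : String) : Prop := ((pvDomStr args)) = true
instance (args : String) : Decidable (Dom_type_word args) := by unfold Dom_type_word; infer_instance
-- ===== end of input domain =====

-- B replaces A's split/rejoin loop with the closed form args.replace('\r','\n') + '\n' (simpler).

-- ===== PORT A =====
-- literal port of A: normalize '\r', split on '\n', loop re-splitting each line
-- on '\t', rejoining with '\t' and appending '\n' to a growing accumulator.
def type_word (args : String) : String :=
  let args1 := PySem.Str.replace args "\r" "\n"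
  let lines := PySem.Chars.splitOn args1.toList ['\n']
  let converted := lines.foldl
    (fun acc line => acc ++ PySem.Chars.join ['\t'] (PySem.Chars.splitOn line ['\t']) ++ ['\n']) []
  String.ofList converted

-- ===== PORT B =====
-- literal port of B: closed form, normalized text plus one final newline.
def type_word_alt (args : String) : String :=
  String.ofList ((PySem.Str.replace args "\r" "\n").toList ++ ['\n'])

-- ===== PRECONDITION & SPEC =====
def Spec_type_word (args : String) (out : String) : Prop := out = type_word_alt args
instance (args : String) (out : String) : Decidable (Spec_type_word args out) := by unfold Spec_type_word; infer_instance

-- ===== CLAIM (what is proved, stated in full; the proofs are below) =====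
def Claim_equal_type_word : Prop := ∀ (args : String), Dom_type_word args → Spec_type_word args (type_word args)

-- ===== LEMMAS AND PROOFS =====

-- PySem.Chars.splitOn with a single-character separator is Mathlib's List.splitOnP.
theorem pySplitOn_go_spec (t : Char) :
    ∀ (fuel : Nat) (l cur : List Char) (acc : List (List Char)), l.length < fuel →
      PySem.Chars.splitOn.go [t] fuel l cur acc =
        acc.reverse ++ (List.splitOnP (· == t) l).modifyHead (cur.reverse ++ ·) := by
  intro fuel
  induction fuel with
  | zero => intro l cur acc h; omega
  | succ n ih =>
    intro l cur acc h
    cases l with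
    | nil =>
      rw [PySem.Chars.splitOn.go.eq_def]
      simp [List.splitOnP_nil]
    | cons c rest =>
      by_cases hc : c = t
      · subst hc
        have hpre : List.isPrefixOf [c] (c :: rest) = true := by
          simp [List.isPrefixOf]
        rw [PySem.Chars.splitOn.go.eq_def]
        simp only [hpre, if_true, List.length_cons] at *
        simp only [List.length_nil, List.drop_succ_cons, List.drop_zero]
        rw [ih rest [] (cur.reverse :: acc) (by simpa using Nat.lt_of_succ_lt_succ h)]
        simp [List.splitOnP_cons]
        exact congrFun List.modifyHead_id _
      · have hpre : List.isPrefixOf [t] (c :: rest) = false := by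
          simp [List.isPrefixOf]
          exact fun hh => (hc hh.symm).elim
        rw [PySem.Chars.splitOn.go.eq_def]
        simp only [hpre, if_false, Bool.false_eq_true]
        rw [ih rest (c :: cur) acc (by simpa using Nat.lt_of_succ_lt_succ h)]
        rw [List.splitOnP_cons]
        simp only [beq_iff_eq, hc, if_false, List.modifyHead_modifyHead]
        congr 2
        funext x
        simp

theorem pySplitOn_single (t : Char) (l : List Char) :
    PySem.Chars.splitOn l [t] = List.splitOnP (· == t) l := by
  rw [PySem.Chars.splitOn, pySplitOn_go_spec t (l.length + 1) l [] [] (by omega)]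
  simp only [List.reverse_nil, List.nil_append]
  exact congrFun List.modifyHead_id _

-- '\t'.join(line.split('\t')) is the identity.
theorem join_splitOnP_id (t : Char) (l : List Char) :
    PySem.Chars.join [t] (List.splitOnP (· == t) l) = l := by
  rw [PySem.Chars.join]
  exact List.intercalate_splitOn l t

-- joining back the '\n'-split pieces, each with one trailing '\n', gives s ++ ['\n'].
theorem flatMap_splitOnP_newline (n : Char) (s : List Char) :
    (List.splitOnP (· == n) s).flatMap (fun line => line ++ [n]) = s ++ [n] := by
  induction s with
  | nil => simp [List.splitOnP_nil]
  | cons c rest ih =>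
    rw [List.splitOnP_cons]
    by_cases hc : c = n
    · subst hc
      simp [ih]
    · simp only [beq_iff_eq, hc, if_false]
      obtain ⟨h, t, ht⟩ := List.exists_cons_of_ne_nil (List.splitOnP_ne_nil (· == n) rest)
      rw [ht]
      rw [ht] at ih
      simp only [List.modifyHead_cons, List.flatMap_cons] at *
      simp [← ih]

-- ===== VERDICT (by name: the statement is the Claim_ definition above) =====
theorem type_word_spec : Claim_equal_type_word := by
  intro args _
  unfold Spec_type_word type_word type_word_alt
  dsimp only
  simp only [List.append_assoc]
  rw [PySem.List.foldl_append_eq_flatMap]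
  simp only [List.nil_append, pySplitOn_single, join_splitOnP_id, flatMap_splitOnP_newline]
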